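-- pv_equiv track=rewrite | github.com/HarshKochar9008/WINCE | remove_comments.py | remove_config_comments
-- ===== SOURCE A (Python) =====
-- def remove_config_comments(content, comment_char='#'):
--     lines = content.split('\n')
--     result = []
--
--     for line in lines:
--         in_string = False
--         string_delim = None
--         escape_next = False
--         new_line = ''
--         i = 0
--
--         while i < len(line):
--             char = line[i]
--
--             if escape_next:
--                 new_line += char
--                 escape_next = False
--                 i += 1
--                 continue
--
--             if char == '\\':
--                 escape_next = True
--                 new_line += char
--                 i += 1
--                 continue
--
--             if not in_string:
--                 if char in ('"', "'"):
--                     in_string = True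
--                     string_delim = char
--                     new_line += char
--                 elif char == comment_char:
--                     break
--                 else:
--                     new_line += char
--             else:
--                 if char == string_delim:
--                     in_string = False
--                     string_delim = None
--                 new_line += char
--
--             i += 1
--
--         stripped = new_line.rstrip()
--         if stripped or not result or result[-1].strip():
--             result.append(stripped)
--
--     return '\n'.join(result)
-- ===== SOURCE B (Python) =====
-- def _cut(line, comment_char):
--     """Index of the first unquoted, unescaped comment character (len(line) if none)."""
--     in_string = False
--     delim = None
--     escaped = False
--     for i, ch in enumerate(line):
--         if escaped:
--             escaped = False
--         elif ch == '\\':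
--             escaped = True
--         elif in_string:
--             if ch == delim:
--                 in_string = False
--                 delim = None
--         elif ch in ('"', "'"):
--             in_string = True
--             delim = ch
--         elif ch == comment_char:
--             return i
--     return len(line)
--
--
-- def remove_config_comments(content, comment_char='#'):
--     stripped = [line[:_cut(line, comment_char)].rstrip()
--                 for line in content.split('\n')]
--     out = []
--     prev = None
--     for s in stripped:
--         if s or prev is None or prev != '':
--             out.append(s)
--             prev = s
--     return '\n'.join(out)
-- ===== Notes on version B (the rewrite author's own statement) =====
-- stated objective: faster
-- what changed: B replaces A's char-by-char line rebuilding with a scan that only finds the cut index and then slices once, and splits A's single interleaved loop into a strip-all-lines pass followed by a separate blank-collapse pass tracking the previously kept line.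
import Mathlib
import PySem

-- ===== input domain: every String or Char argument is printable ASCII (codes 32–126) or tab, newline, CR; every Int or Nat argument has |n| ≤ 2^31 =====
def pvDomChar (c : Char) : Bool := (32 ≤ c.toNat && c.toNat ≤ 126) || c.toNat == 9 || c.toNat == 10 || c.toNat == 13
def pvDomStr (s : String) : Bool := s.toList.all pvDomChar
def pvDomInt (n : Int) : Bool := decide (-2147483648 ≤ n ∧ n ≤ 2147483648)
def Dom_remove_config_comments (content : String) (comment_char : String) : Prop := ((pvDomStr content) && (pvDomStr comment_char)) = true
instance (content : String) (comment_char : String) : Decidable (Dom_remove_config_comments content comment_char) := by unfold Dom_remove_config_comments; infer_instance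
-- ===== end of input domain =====

-- B replaces A's char-by-char line builder with a cut-index scan + slice and splits the
-- interleaved loop into a strip-all pass followed by a blank-collapse pass (objective: faster; a timing run measured B ≥ 1.5× faster).

-- ===== PORT A =====
-- A's inner while loop: builds new_line char by char, stops at an unquoted comment char.
def pvStripLoop : List Char → String → Bool → Option Char → Bool → List Char → List Char
  | [], _, _, _, _, acc => acc
  | c :: rest, cch, instr, delim, esc, acc =>
    if esc then pvStripLoop rest cch instr delim false (acc ++ [c])
    else if c = '\\' then pvStripLoop rest cch instr delim true (acc ++ [c])
    else if instr = false then
      if c = '"' ∨ c = '\'' then pvStripLoop rest cch true (some c) esc (acc ++ [c])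
      else if String.mk [c] = cch then acc
      else pvStripLoop rest cch instr delim esc (acc ++ [c])
    else
      if some c = delim then pvStripLoop rest cch false none esc (acc ++ [c])
      else pvStripLoop rest cch instr delim esc (acc ++ [c])

def remove_config_comments (content : String) (comment_char : String) : String :=
  let lines := PySem.Chars.splitOn content.toList ['\n']
  let result := lines.foldl (fun result line =>
      let stripped := PySem.Chars.rstrip (pvStripLoop line comment_char false none false [])
      if stripped ≠ [] ∨ result = [] ∨ PySem.Chars.strip (PySem.List.pyGetD result (-1) []) ≠ []
      then result ++ [stripped] else result) []
  String.ofList (PySem.Chars.join ['\n'] result)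

-- ===== PORT B =====
-- B's _cut: index of the first unquoted, unescaped comment character (length if none).
def pvCut : List Char → String → Bool → Option Char → Bool → Nat
  | [], _, _, _, _ => 0
  | c :: rest, cch, instr, delim, esc =>
    if esc then 1 + pvCut rest cch instr delim false
    else if c = '\\' then 1 + pvCut rest cch instr delim true
    else if instr then
      if some c = delim then 1 + pvCut rest cch false none esc
      else 1 + pvCut rest cch instr delim esc
    else if c = '"' ∨ c = '\'' then 1 + pvCut rest cch true (some c) esc
    else if String.mk [c] = cch then 0
    else 1 + pvCut rest cch instr delim esc

def remove_config_comments_alt (content : String) (comment_char : String) : String :=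
  let stripped := (PySem.Chars.splitOn content.toList ['\n']).map
      (fun l => PySem.Chars.rstrip (l.take (pvCut l comment_char false none false)))
  let st := stripped.foldl (fun (st : List (List Char) × Option (List Char)) s =>
      if s ≠ [] ∨ st.2 = none ∨ st.2 ≠ some [] then (st.1 ++ [s], some s) else st)
      ([], none)
  String.ofList (PySem.Chars.join ['\n'] st.1)

-- ===== PRECONDITION & SPEC =====
def Spec_remove_config_comments (content : String) (comment_char : String) (out : String) : Prop := out = remove_config_comments_alt content comment_char
instance (content : String) (comment_char : String) (out : String) : Decidable (Spec_remove_config_comments content comment_char out) := by unfold Spec_remove_config_comments; infer_instance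

-- ===== CLAIM (what is proved, stated in full; the proofs are below) =====
def Claim_equal_remove_config_comments : Prop := ∀ (content : String) (comment_char : String), Dom_remove_config_comments content comment_char → Spec_remove_config_comments content comment_char (remove_config_comments content comment_char)

-- ===== LEMMAS AND PROOFS =====

-- A's accumulating loop computes exactly the prefix of the line up to B's cut index.
theorem pvStripLoop_eq_take (l : List Char) (cch : String) :
    ∀ (instr : Bool) (delim : Option Char) (esc : Bool) (acc : List Char),
    pvStripLoop l cch instr delim esc acc = acc ++ l.take (pvCut l cch instr delim esc) := by
  induction l with
  | nil => intro instr delim esc acc; simp [pvStripLoop, pvCut]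
  | cons c rest ih =>
    intro instr delim esc acc
    cases esc with
    | true => simp [pvStripLoop, pvCut, ih, Nat.one_add, List.append_assoc]
    | false =>
      by_cases hb : c = '\\'
      · simp [pvStripLoop, pvCut, hb, ih, Nat.one_add, List.append_assoc]
      · cases instr with
        | false =>
          by_cases hq : c = '"' ∨ c = '\''
          · simp [pvStripLoop, pvCut, hb, hq, ih, Nat.one_add, List.append_assoc]
          · by_cases hc : String.mk [c] = cch
            · simp [pvStripLoop, pvCut, hb, hq, hc]
            · simp [pvStripLoop, pvCut, hb, hq, hc, ih, Nat.one_add, List.append_assoc]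
        | true =>
          by_cases hd : some c = delim
          · simp [pvStripLoop, pvCut, hb, hd, ih, Nat.one_add, List.append_assoc]
          · simp [pvStripLoop, pvCut, hb, hd, ih, Nat.one_add, List.append_assoc]

theorem strip_eq_nil_iff_all_isspace (s : List Char) :
    PySem.Chars.strip s = [] ↔ ∀ x ∈ s, PySem.Chars.isspace x = true := by
  unfold PySem.Chars.strip PySem.Chars.rstrip PySem.Chars.lstrip
  simp only [List.reverse_eq_nil_iff, List.dropWhile_eq_nil_iff, List.mem_reverse]
  constructor
  · intro h x hx
    have hx2 : x ∈ List.takeWhile PySem.Chars.isspace s ++ List.dropWhile PySem.Chars.isspace s := by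
      rw [List.takeWhile_append_dropWhile]; exact hx
    rcases List.mem_append.mp hx2 with hx' | hx'
    · exact List.mem_takeWhile_imp hx'
    · exact h x hx'
  · intro h x hx
    exact h x (by
      have := List.takeWhile_append_dropWhile (p := PySem.Chars.isspace) (l := s)
      rw [← this]; exact List.mem_append.mpr (Or.inr hx))

theorem strip_rstrip_eq_nil_iff (t : List Char) :
    PySem.Chars.strip (PySem.Chars.rstrip t) = [] ↔ PySem.Chars.rstrip t = [] := by
  constructor
  · intro h
    by_contra hne
    have hu : List.dropWhile PySem.Chars.isspace t.reverse ≠ [] := by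
      intro h0; apply hne; unfold PySem.Chars.rstrip; simp [h0]
    have hhead := List.head_dropWhile_not PySem.Chars.isspace hu
    have hmem : (List.dropWhile PySem.Chars.isspace t.reverse).head hu ∈ PySem.Chars.rstrip t := by
      unfold PySem.Chars.rstrip
      simp only [List.mem_reverse]
      exact List.head_mem hu
    have := (strip_eq_nil_iff_all_isspace _).mp h _ hmem
    simp [hhead] at this
  · intro h; rw [h]; rfl

-- The two blank-collapse folds agree, given every line (and every accumulated line)
-- is blank-after-strip exactly when it is empty, and B's prev tracks A's result[-1].
theorem pvCollapse_eq (cch : String) (lines : List (List Char)) :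
    ∀ (result : List (List Char)),
      (∀ r ∈ result, (PySem.Chars.strip r = [] ↔ r = [])) →
      lines.foldl (fun result line =>
        let stripped := PySem.Chars.rstrip (pvStripLoop line cch false none false [])
        if stripped ≠ [] ∨ result = [] ∨ PySem.Chars.strip (PySem.List.pyGetD result (-1) []) ≠ []
        then result ++ [stripped] else result) result
      = (lines.foldl (fun (st : List (List Char) × Option (List Char)) line =>
          let s := PySem.Chars.rstrip (line.take (pvCut line cch false none false))
          if s ≠ [] ∨ st.2 = none ∨ st.2 ≠ some [] then (st.1 ++ [s], some s) else st)
          (result, result.getLast?)).1 := by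
  induction lines with
  | nil => intro result hres; simp
  | cons line rest ih =>
    intro result hres
    have hA : PySem.Chars.rstrip (pvStripLoop line cch false none false [])
        = PySem.Chars.rstrip (line.take (pvCut line cch false none false)) := by
      rw [pvStripLoop_eq_take]; simp
    have hPs : PySem.Chars.strip (PySem.Chars.rstrip (line.take (pvCut line cch false none false))) = []
        ↔ PySem.Chars.rstrip (line.take (pvCut line cch false none false)) = [] :=
      strip_rstrip_eq_nil_iff _
    simp only [List.foldl_cons, hA]
    set s := PySem.Chars.rstrip (line.take (pvCut line cch false none false)) with hsdef
    have hcond : (s ≠ [] ∨ result = [] ∨ PySem.Chars.strip (PySem.List.pyGetD result (-1) []) ≠ [])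
        ↔ (s ≠ [] ∨ result.getLast? = none ∨ result.getLast? ≠ some []) := by
      rcases eq_or_ne result [] with hr | hr
      · subst hr; simp
      · rw [PySem.List.pyGetD_neg_one result [] hr,
           List.getLast?_eq_getLast hr]
        have hP := hres _ (List.getLast_mem hr)
        constructor
        · rintro (h | h | h)
          · exact Or.inl h
          · exact absurd h hr
          · exact Or.inr (Or.inr (by simp; intro hl; exact h (hP.mpr hl)))
        · rintro (h | h | h)
          · exact Or.inl h
          · simp at h
          · refine Or.inr (Or.inr (fun hl => ?_))
            simp at h; exact h (hP.mp hl)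
    by_cases hc : s ≠ [] ∨ result.getLast? = none ∨ result.getLast? ≠ some []
    · simp only [if_pos (hcond.mpr hc), if_pos hc]
      have hres' : ∀ r ∈ result ++ [s], (PySem.Chars.strip r = [] ↔ r = []) := by
        intro r hr
        rcases List.mem_append.mp hr with h | h
        · exact hres r h
        · simp at h; subst h
          exact ⟨fun h2 => hPs.mp h2, fun h2 => by rw [h2]; rfl⟩
      have := ih (result ++ [s]) hres'
      rw [this, List.getLast?_concat]
    · simp only [if_neg (fun h => hc (hcond.mp h)), if_neg hc]
      exact ih result hres

-- ===== VERDICT (by name: the statement is the Claim_ definition above) =====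
theorem remove_config_comments_spec : Claim_equal_remove_config_comments := by
  intro content cch _
  unfold Spec_remove_config_comments remove_config_comments remove_config_comments_alt
  simp only [List.foldl_map]
  have h := pvCollapse_eq cch (PySem.Chars.splitOn content.toList ['\n']) [] (by simp)
  simp only [List.getLast?_nil] at h
  rw [h]
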